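-- pv_equiv track=rewrite | github.com/ambatireddy369/projectSF_Star | skills/apex/apex-queueable-patterns/scripts/check_apex_queueable_patterns.py | extract_execute_body
-- ===== SOURCE A (Python) =====
-- def extract_execute_body(lines: list[str], start_index: int) -> list[str]:
--     """Return lines inside the first { } block starting at or after start_index."""
--     body: list[str] = []
--     depth = 0
--     started = False
--     for i in range(start_index, len(lines)):
--         line = lines[i]
--         opens = line.count("{")
--         closes = line.count("}")
--         if not started and opens > 0:
--             started = True
--         if started:
--             body.append(line)
--             depth += opens - closes
--             if depth <= 0 and started:
--                 break
--     return body
-- ===== SOURCE B (Python) =====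
-- def extract_execute_body(lines: list[str], start_index: int) -> list[str]:
--     """Return lines inside the first { } block starting at or after start_index."""
--     tail = lines[start_index:]
--     sums = [0]
--     total = 0
--     for line in tail:
--         total += line.count("{") - line.count("}")
--         sums.append(total)
--     j = next((i for i, line in enumerate(tail) if line.count("{") > 0), None)
--     if j is None:
--         return []
--     sj = sums[j]
--     k = next((k for k in range(j, len(tail)) if sums[k + 1] - sj <= 0), None)
--     return tail[j:] if k is None else tail[j:k + 1]
-- ===== Notes on version B (the rewrite author's own statement) =====
-- stated objective: alternative
-- what changed: A's single online state machine (started flag, running depth, append-as-you-go accumulator with early break) is replaced by a staged array formulation: first materialise the whole prefix-sum array of per-line brace deltas over lines[start_index:], then locate the opening line, then pick the block end by comparing precomputed prefix sums (sums[k+1]-sums[j] <= 0) and return a slice of the input.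
-- outside the precondition, e.g. on extract_execute_body(['{', '}'], -1): A returns ['{', '}'], B returns []
import Mathlib
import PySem

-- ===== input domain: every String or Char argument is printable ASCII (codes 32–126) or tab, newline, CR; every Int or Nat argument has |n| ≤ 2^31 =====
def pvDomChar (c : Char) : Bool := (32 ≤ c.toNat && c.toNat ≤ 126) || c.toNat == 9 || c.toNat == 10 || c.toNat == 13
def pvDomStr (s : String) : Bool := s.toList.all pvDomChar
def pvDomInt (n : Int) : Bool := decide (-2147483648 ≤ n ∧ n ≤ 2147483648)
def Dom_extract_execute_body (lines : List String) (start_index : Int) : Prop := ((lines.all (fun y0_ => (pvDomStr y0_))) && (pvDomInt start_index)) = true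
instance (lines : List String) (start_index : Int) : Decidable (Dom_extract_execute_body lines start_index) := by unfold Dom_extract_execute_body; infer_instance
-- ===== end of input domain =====

-- B replaces A's online state machine (started flag, running depth, early break) by a staged
-- formulation: materialise the prefix-sum array of per-line brace deltas over the suffix, then
-- choose the block end by comparing precomputed sums; objective: alternative, not speed.


-- ===== PORT A =====
-- A's for-loop over range(start_index, len(lines)) with state (body, depth, started);
-- pyGet? none (IndexError, only reachable for start_index < -len) returns the body built so far —
-- unreachable under Pre_ (0 ≤ start_index).
def pvALoop (lines : List String) (idxs : List Int) (body : List String)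
    (depth : Int) (started : Bool) : List String :=
  match idxs with
  | [] => body
  | i :: rest =>
    match PySem.List.pyGet? lines i with
    | none => body
    | some line =>
      let opens : Int := (PySem.Str.count line "{" : Int)
      let closes : Int := (PySem.Str.count line "}" : Int)
      let started := started || decide (0 < opens)
      if started then
        let body := body ++ [line]
        let depth := depth + opens - closes
        if depth ≤ 0 then body else pvALoop lines rest body depth started
      else pvALoop lines rest body depth started

def extract_execute_body (lines : List String) (start_index : Int) : List String :=
  pvALoop lines (PySem.List.pyRange start_index (lines.length : Int) 1) [] 0 false

-- ===== PORT B =====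
-- per-line brace delta, line.count("{") - line.count("}")
def pvDelta (line : String) : Int :=
  (PySem.Str.count line "{" : Int) - (PySem.Str.count line "}" : Int)

-- the for-loop building the prefix-sum array sums (and running total)
def pvSumsLoop (tail : List String) (sums : List Int) (total : Int) : List Int :=
  match tail with
  | [] => sums
  | line :: rest =>
    let total := total + pvDelta line
    pvSumsLoop rest (sums ++ [total]) total

-- next((i for i, line in enumerate(tail) if line.count("{") > 0), None)
def pvFindJ (tail : List String) (i : Int) : Option Int :=
  match tail with
  | [] => none
  | line :: rest =>
    if 0 < (PySem.Str.count line "{" : Int) then some i else pvFindJ rest (i + 1)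

-- next((k for k in range(j, len(tail)) if sums[k+1] - sj <= 0), None);
-- pyGet? none (IndexError) is unreachable: sums has len(tail)+1 entries and k < len(tail)
def pvFindK (sums : List Int) (sj : Int) (ks : List Int) : Option Int :=
  match ks with
  | [] => none
  | k :: rest =>
    match PySem.List.pyGet? sums (k + 1) with
    | none => none
    | some s => if s - sj ≤ 0 then some k else pvFindK sums sj rest

def extract_execute_body_alt (lines : List String) (start_index : Int) : List String :=
  let tail := PySem.List.slice lines (some start_index) none
  let sums := pvSumsLoop tail [0] 0
  match pvFindJ tail 0 with
  | none => []
  | some j =>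
    match PySem.List.pyGet? sums j with
    | none => []   -- sj = sums[j]; IndexError, unreachable (j indexes tail, sums is longer)
    | some sj =>
      match pvFindK sums sj (PySem.List.pyRange j (tail.length : Int) 1) with
      | none => PySem.List.slice tail (some j) none
      | some k => PySem.List.slice tail (some j) (some (k + 1))

-- ===== PRECONDITION & SPEC =====
-- Pre_ restricts to the natural domain of a starting line index (0 ≤ start_index): for negative
-- values A either raises IndexError (start_index < -len) or scans with Python's negative-index
-- wraparound, which no caller of this line-scanner relies on; B slices the suffix there instead.
def Pre_extract_execute_body (lines : List String) (start_index : Int) : Prop :=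
  0 ≤ start_index
instance (lines : List String) (start_index : Int) : Decidable (Pre_extract_execute_body lines start_index) := by unfold Pre_extract_execute_body; infer_instance

def pvWitness_extract_execute_body : List String × Int :=
  (["public void execute() {", "  doWork();", "}"], 0)

def Spec_extract_execute_body (lines : List String) (start_index : Int) (out : List String) : Prop := out = extract_execute_body_alt lines start_index
instance (lines : List String) (start_index : Int) (out : List String) : Decidable (Spec_extract_execute_body lines start_index out) := by unfold Spec_extract_execute_body; infer_instance

-- ===== CLAIM (what is proved, stated in full; the proofs are below) =====
def Claim_equal_extract_execute_body : Prop := ∀ (lines : List String) (start_index : Int), Dom_extract_execute_body lines start_index → Pre_extract_execute_body lines start_index → Spec_extract_execute_body lines start_index (extract_execute_body lines start_index)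

-- ===== LEMMAS AND PROOFS =====

-- common reference semantics on the suffix list (proof-side only)
def pvCollect (u : List String) (d : Int) : List String :=
  match u with
  | [] => []
  | l :: r =>
    let d := d + pvDelta l
    if d ≤ 0 then [l] else l :: pvCollect r d

def pvRun (u : List String) : List String :=
  match u with
  | [] => []
  | l :: r => if 0 < (PySem.Str.count l "{" : Int) then pvCollect (l :: r) 0 else pvRun r

-- first line index containing '{'
def pvFirstOpen (u : List String) : Option Nat :=
  match u with
  | [] => none
  | l :: r =>
    if 0 < (PySem.Str.count l "{" : Int) then some 0 else (pvFirstOpen r).map (· + 1)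

-- first m with running delta sum over u[0..m] ≤ d-offset
def pvStop? (u : List String) (d : Int) : Option Nat :=
  match u with
  | [] => none
  | l :: r =>
    let d := d + pvDelta l
    if d ≤ 0 then some 0 else (pvStop? r d).map (· + 1)

-- prefix sum of deltas of the first m lines
def pvS (u : List String) (m : Nat) : Int := ((u.take m).map pvDelta).sum

-- trace of deltas appended by the sums loop
def pvScanT (u : List String) (t : Int) : List Int :=
  match u with
  | [] => []
  | l :: r => (t + pvDelta l) :: pvScanT r (t + pvDelta l)

lemma pvSumsLoop_eq (u : List String) : ∀ (sums : List Int) (t : Int),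
    pvSumsLoop u sums t = sums ++ pvScanT u t := by
  induction u with
  | nil => intro sums t; simp [pvSumsLoop, pvScanT]
  | cons l r ih => intro sums t; simp [pvSumsLoop, pvScanT, ih]

lemma pvS_succ (u : List String) (i : Nat) (h : i < u.length) :
    pvS u (i + 1) = pvS u i + pvDelta u[i] := by
  unfold pvS
  rw [List.map_take, List.map_take, List.sum_take_succ _ i (by simpa using h)]
  simp

lemma pvScanT_get? (u : List String) : ∀ (i : Nat) (t : Int), i < u.length →
    (pvScanT u t)[i]? = some (t + pvS u (i + 1)) := by
  induction u with
  | nil => intro i t h; simp at h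
  | cons l r ih =>
    intro i t h
    cases i with
    | zero => simp [pvScanT, pvS]
    | succ i =>
      have := ih i (t + pvDelta l) (by simpa using h)
      simp only [pvScanT, List.getElem?_cons_succ, this]
      have : pvS (l :: r) (i + 1 + 1) = pvDelta l + pvS r (i + 1) := by
        simp [pvS, List.take_succ_cons]
      rw [this]; ring_nf

lemma pvSums_get? (u : List String) (i : Nat) (h : i ≤ u.length) :
    ([0] ++ pvScanT u 0)[i]? = some (pvS u i) := by
  cases i with
  | zero => simp [pvS]
  | succ i =>
    have hi : i < u.length := by omega
    simpa using pvScanT_get? u i 0 hi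

lemma pvCollect_eq_stop (u : List String) : ∀ d : Int,
    pvCollect u d = match pvStop? u d with
      | none => u
      | some m => u.take (m + 1) := by
  induction u with
  | nil => intro d; simp [pvCollect, pvStop?]
  | cons l r ih =>
    intro d
    simp only [pvCollect, pvStop?]
    split_ifs with hd
    · simp
    · rw [ih]
      cases pvStop? r (d + pvDelta l) <;> simp

lemma pvFirstOpen_lt (u : List String) : ∀ m, pvFirstOpen u = some m → m < u.length := by
  induction u with
  | nil => intro m h; simp [pvFirstOpen] at h
  | cons l r ih =>
    intro m h
    simp only [pvFirstOpen] at h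
    split_ifs at h with ho
    · simp at h; simp; omega
    · cases hm : pvFirstOpen r with
      | none => rw [hm] at h; simp at h
      | some m' =>
        rw [hm] at h; simp at h
        have := ih _ hm; simp; omega

lemma pvFindJ_eq (u : List String) : ∀ i : Nat,
    pvFindJ u (i : Int) = (pvFirstOpen u).map (fun m => ((i + m : Nat) : Int)) := by
  induction u with
  | nil => intro i; simp [pvFindJ, pvFirstOpen]
  | cons l r ih =>
    intro i
    simp only [pvFindJ, pvFirstOpen]
    split_ifs with ho
    · simp
    · have : ((i : Int) + 1) = (((i + 1 : Nat)) : Int) := by push_cast; ring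
      rw [this, ih (i + 1)]
      cases pvFirstOpen r with
      | none => simp
      | some m => simp; push_cast; ring

lemma pvRun_eq_firstOpen (u : List String) :
    pvRun u = match pvFirstOpen u with
      | none => []
      | some j => pvCollect (u.drop j) 0 := by
  induction u with
  | nil => simp [pvRun, pvFirstOpen]
  | cons l r ih =>
    simp only [pvRun, pvFirstOpen]
    split_ifs with ho
    · simp
    · rw [ih]
      cases pvFirstOpen r <;> simp

lemma pvFindK_eq (tail : List String) :
    ∀ (fuel k : Nat) (sj : Int), k ≤ tail.length → tail.length - k ≤ fuel →
      pvFindK ([0] ++ pvScanT tail 0) sj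
          (PySem.List.pyRange (k : Int) (tail.length : Int) 1) =
        (pvStop? (tail.drop k) (pvS tail k - sj)).map (fun m => ((k + m : Nat) : Int)) := by
  intro fuel
  induction fuel with
  | zero =>
    intro k sj hk hf
    have hk' : k = tail.length := by omega
    subst hk'
    rw [PySem.List.pyRange_one_eq_nil (by omega)]
    simp [pvFindK, pvStop?]
  | succ n ih =>
    intro k sj hk hf
    by_cases hke : tail.length ≤ k
    · have hk' : k = tail.length := by omega
      subst hk'
      rw [PySem.List.pyRange_one_eq_nil (by omega)]
      simp [pvFindK, pvStop?]
    · push_neg at hke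
      rw [PySem.List.pyRange_one_cons (by exact_mod_cast hke)]
      simp only [pvFindK]
      have hcast : ((k : Int) + 1) = (((k + 1 : Nat)) : Int) := by push_cast; ring
      rw [hcast, PySem.List.pyGet?_natCast, pvSums_get? tail (k + 1) (by omega)]
      have hdrop : tail.drop k = tail[k] :: tail.drop (k + 1) :=
        List.drop_eq_getElem_cons hke
      rw [hdrop]
      simp only [pvStop?]
      have hS : pvS tail (k + 1) = pvS tail k + pvDelta tail[k] := pvS_succ tail k hke
      split_ifs with hc hc2 hc2
      · simp
      · exfalso; rw [hS] at hc; omega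
      · exfalso; rw [hS] at hc; omega
      · rw [ih (k + 1) sj (by omega) (by omega)]
        have he : pvS tail k - sj + pvDelta tail[k] = pvS tail (k + 1) - sj := by
          rw [hS]; ring
        rw [he, Option.map_map]
        cases pvStop? (tail.drop (k + 1)) (pvS tail (k + 1) - sj) with
        | none => rfl
        | some m => simp; push_cast; ring

-- B equals the reference semantics on the dropped suffix
lemma alt_eq_run (lines : List String) (a : Nat) :
    extract_execute_body_alt lines (a : Int) = pvRun (lines.drop a) := by
  unfold extract_execute_body_alt
  simp only [PySem.List.slice_from_natCast, pvSumsLoop_eq]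
  set tail := lines.drop a with htail
  have hfj := pvFindJ_eq tail 0
  simp only [Nat.cast_zero, zero_add] at hfj
  rw [hfj, pvRun_eq_firstOpen]
  cases hj : pvFirstOpen tail with
  | none => simp
  | some j =>
    have hjlt : j < tail.length := pvFirstOpen_lt tail j hj
    simp only [Option.map_some]
    rw [PySem.List.pyGet?_natCast]
    simp only [pvSums_get? tail j (by omega)]
    rw [pvFindK_eq tail (tail.length - j) j (pvS tail j) (by omega) (by omega)]
    cases hs : pvStop? (tail.drop j) (pvS tail j - pvS tail j) with
    | none =>
      simp only [Option.map_none]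
      rw [PySem.List.slice_from_natCast, pvCollect_eq_stop]
      have : pvS tail j - pvS tail j = 0 := by ring
      rw [this] at hs; rw [hs]
    | some m =>
      simp only [Option.map_some]
      have hcast : (((j + m : Nat) : Int) + 1) = (((j + (m + 1) : Nat)) : Int) := by
        push_cast; ring
      rw [hcast]
      have := PySem.List.slice_natCast_add (xs := tail) (j := j) (n := m + 1)
      rw [show ((j : Int) + ((m + 1 : Nat) : Int)) = (((j + (m + 1) : Nat)) : Int) by push_cast; ring] at this
      rw [this, pvCollect_eq_stop]
      have hz : pvS tail j - pvS tail j = 0 := by ring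
      rw [hz] at hs; rw [hs]

-- A-side: the started loop collects like pvCollect
lemma pvALoop_started (lines : List String) :
    ∀ (fuel k : Nat) (body : List String) (d : Int), lines.length - k ≤ fuel →
      pvALoop lines (PySem.List.pyRange (k : Int) (lines.length : Int) 1) body d true =
        body ++ pvCollect (lines.drop k) d := by
  intro fuel
  induction fuel with
  | zero =>
    intro k body d hf
    rw [PySem.List.pyRange_one_eq_nil (by omega), List.drop_eq_nil_of_le (by omega)]
    simp [pvALoop, pvCollect]
  | succ n ih =>
    intro k body d hf
    by_cases hke : lines.length ≤ k
    · rw [PySem.List.pyRange_one_eq_nil (by omega), List.drop_eq_nil_of_le hke]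
      simp [pvALoop, pvCollect]
    · push_neg at hke
      rw [PySem.List.pyRange_one_cons (by exact_mod_cast hke),
        List.drop_eq_getElem_cons hke]
      simp only [pvALoop, pvCollect, PySem.List.pyGet?_natCast,
        List.getElem?_eq_getElem hke, Bool.true_or, if_true]
      have harith : d + (PySem.Str.count lines[k] "{" : Int) -
          (PySem.Str.count lines[k] "}" : Int) = d + pvDelta lines[k] := by
        unfold pvDelta; ring
      rw [harith]
      split_ifs with hd
      · simp
      · have hcast : ((k : Int) + 1) = (((k + 1 : Nat)) : Int) := by push_cast; ring
        rw [hcast, ih (k + 1) (body ++ [lines[k]]) _ (by omega)]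
        simp

lemma a_eq_run (lines : List String) :
    ∀ (fuel a : Nat), lines.length - a ≤ fuel →
      pvALoop lines (PySem.List.pyRange (a : Int) (lines.length : Int) 1) [] 0 false =
        pvRun (lines.drop a) := by
  intro fuel
  induction fuel with
  | zero =>
    intro a hf
    rw [PySem.List.pyRange_one_eq_nil (by omega), List.drop_eq_nil_of_le (by omega)]
    simp [pvALoop, pvRun]
  | succ n ih =>
    intro a hf
    by_cases hae : lines.length ≤ a
    · rw [PySem.List.pyRange_one_eq_nil (by omega), List.drop_eq_nil_of_le hae]
      simp [pvALoop, pvRun]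
    · push_neg at hae
      rw [PySem.List.pyRange_one_cons (by exact_mod_cast hae),
        List.drop_eq_getElem_cons hae]
      simp only [pvALoop, pvRun, PySem.List.pyGet?_natCast,
        List.getElem?_eq_getElem hae, Bool.false_or]
      have hcast : ((a : Int) + 1) = (((a + 1 : Nat)) : Int) := by push_cast; ring
      by_cases ho : 0 < (PySem.Str.count lines[a] "{" : Int)
      · simp only [ho, decide_true, if_true]
        simp only [pvCollect]
        have harith : (0 : Int) + (PySem.Str.count lines[a] "{" : Int) -
            (PySem.Str.count lines[a] "}" : Int) = 0 + pvDelta lines[a] := by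
          unfold pvDelta; ring
        rw [harith]
        split_ifs with hd
        · simp
        · rw [hcast, pvALoop_started lines (lines.length - (a + 1)) (a + 1) _ _ (by omega)]
          simp
      · simp only [ho, decide_false, Bool.false_eq_true, if_false, if_false]
        rw [hcast, ih (a + 1) (by omega)]

-- ===== VERDICT (by name: the statement is the Claim_ definition above) =====
theorem extract_execute_body_spec : Claim_equal_extract_execute_body := by
  intro lines start_index _ hpre
  have h : start_index = ((start_index.toNat : Nat) : Int) := (Int.toNat_of_nonneg hpre).symm
  unfold Spec_extract_execute_body extract_execute_body
  rw [h, a_eq_run lines (lines.length - start_index.toNat) start_index.toNat (le_refl _),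
    alt_eq_run]
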